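-- pv_equiv track=rewrite | github.com/BellCordeiro/BellCordeiro | CriarNFT 3.py | tagbarba
-- ===== SOURCE A (Python) =====
-- def tagbarba(barba):
--     barba_chevron=[5,25,26]
--     barba_imperial=[4,13,17,18,24,29,33,39]
--     barba_english=[3,9,10,11,12,21,27]
--     barba_fu_manchu=[2,35]
--     barba_pencil=[1,6]
--     barba_painter=[7,8,15,28]
--     barba_horseshoe=[30,31,32]
--     barba_pyramidal=[22,37]
--     barba_walrus=[14,23,34,36]
--     barba_française=[16,19]
--     barba_handlebear=[20]
--     barba_toothbrush=[38]
--     if(barba == '0'):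
--         return ('Beard : none')
--     for be in barba_chevron:
--         if barba == str(be):
--             return ('Beard : chevron')
--     for be in barba_imperial:
--         if barba == str(be):
--             return ('Beard : imperial')
--     for be in barba_english:
--         if barba == str(be):
--             return ('Beard : english')
--     for be in barba_fu_manchu:
--         if barba == str(be):
--             return ('Beard : fu manchu')
--     for be in barba_pencil:
--         if barba == str(be):
--             return ('Beard : pencil')
--     for be in barba_painter:
--         if barba == str(be):
--             return ('Beard : painter')
--     for be in barba_horseshoe:
--         if barba == str(be):
--             return ('Beard : horseshoe')
--     for be in barba_pyramidal:
--         if barba == str(be):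
--             return ('Beard : pyramidal')
--     for be in barba_walrus:
--         if barba == str(be):
--             return ('Beard : walrus')
--     for be in barba_française:
--         if barba == str(be):
--             return ('Beard : française')
--     for be in barba_handlebear:
--         if barba == str(be):
--             return ('Beard : handlebear')
--     for be in barba_toothbrush:
--         if barba == str(be):
--             return ('Beard : toothbrush')
--
--
--
--
--
--
--     return('Beard : Não catalogado')
-- ===== SOURCE B (Python) =====
-- def tagbarba(barba):
--     groups = {
--         'none': [0],
--         'chevron': [5, 25, 26],
--         'imperial': [4, 13, 17, 18, 24, 29, 33, 39],
--         'english': [3, 9, 10, 11, 12, 21, 27],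
--         'fu manchu': [2, 35],
--         'pencil': [1, 6],
--         'painter': [7, 8, 15, 28],
--         'horseshoe': [30, 31, 32],
--         'pyramidal': [22, 37],
--         'walrus': [14, 23, 34, 36],
--         'française': [16, 19],
--         'handlebear': [20],
--         'toothbrush': [38],
--     }
--     table = {}
--     for name, ids in groups.items():
--         for i in ids:
--             table[str(i)] = 'Beard : ' + name
--     return table.get(barba, 'Beard : Não catalogado')
-- ===== Notes on version B (the rewrite author's own statement) =====
-- stated objective: simpler
-- what changed: Replaces the twelve sequential per-category scan loops with one id->message dict built once and a single table.get lookup with the default.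
import Mathlib
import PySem

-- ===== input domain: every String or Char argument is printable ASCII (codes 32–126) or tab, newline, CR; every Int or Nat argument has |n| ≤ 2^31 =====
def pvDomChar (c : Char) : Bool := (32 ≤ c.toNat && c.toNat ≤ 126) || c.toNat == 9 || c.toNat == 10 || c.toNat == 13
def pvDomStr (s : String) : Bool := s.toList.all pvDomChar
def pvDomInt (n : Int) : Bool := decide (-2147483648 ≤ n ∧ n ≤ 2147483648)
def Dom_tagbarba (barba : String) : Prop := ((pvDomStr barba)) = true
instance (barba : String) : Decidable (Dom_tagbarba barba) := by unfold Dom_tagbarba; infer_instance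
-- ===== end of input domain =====

-- B replaces A's twelve sequential scan loops by one dict built once and a single lookup (objective: simpler).


-- ===== PORT A =====
-- A's 'for be in lst: if barba == str(be): return tag' loops become List.any over the same lists
def tagbarba (barba : String) : String :=
  let barba_chevron : List Int := [5,25,26]
  let barba_imperial : List Int := [4,13,17,18,24,29,33,39]
  let barba_english : List Int := [3,9,10,11,12,21,27]
  let barba_fu_manchu : List Int := [2,35]
  let barba_pencil : List Int := [1,6]
  let barba_painter : List Int := [7,8,15,28]
  let barba_horseshoe : List Int := [30,31,32]
  let barba_pyramidal : List Int := [22,37]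
  let barba_walrus : List Int := [14,23,34,36]
  let barba_française : List Int := [16,19]
  let barba_handlebear : List Int := [20]
  let barba_toothbrush : List Int := [38]
  if barba == "0" then "Beard : none"
  else if barba_chevron.any (fun be => barba == PySem.Int.toStr be) then "Beard : chevron"
  else if barba_imperial.any (fun be => barba == PySem.Int.toStr be) then "Beard : imperial"
  else if barba_english.any (fun be => barba == PySem.Int.toStr be) then "Beard : english"
  else if barba_fu_manchu.any (fun be => barba == PySem.Int.toStr be) then "Beard : fu manchu"
  else if barba_pencil.any (fun be => barba == PySem.Int.toStr be) then "Beard : pencil"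
  else if barba_painter.any (fun be => barba == PySem.Int.toStr be) then "Beard : painter"
  else if barba_horseshoe.any (fun be => barba == PySem.Int.toStr be) then "Beard : horseshoe"
  else if barba_pyramidal.any (fun be => barba == PySem.Int.toStr be) then "Beard : pyramidal"
  else if barba_walrus.any (fun be => barba == PySem.Int.toStr be) then "Beard : walrus"
  else if barba_française.any (fun be => barba == PySem.Int.toStr be) then "Beard : française"
  else if barba_handlebear.any (fun be => barba == PySem.Int.toStr be) then "Beard : handlebear"
  else if barba_toothbrush.any (fun be => barba == PySem.Int.toStr be) then "Beard : toothbrush"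
  else "Beard : Não catalogado"

-- ===== PORT B =====
def tagbarbaGroups : List (String × List Int) :=
  [("none", [0]),
   ("chevron", [5,25,26]),
   ("imperial", [4,13,17,18,24,29,33,39]),
   ("english", [3,9,10,11,12,21,27]),
   ("fu manchu", [2,35]),
   ("pencil", [1,6]),
   ("painter", [7,8,15,28]),
   ("horseshoe", [30,31,32]),
   ("pyramidal", [22,37]),
   ("walrus", [14,23,34,36]),
   ("française", [16,19]),
   ("handlebear", [20]),
   ("toothbrush", [38])]

def tagbarbaTable : PySem.Dict String String :=
  tagbarbaGroups.foldl
    (fun table p => p.2.foldl (fun t i => t.insert (PySem.Int.toStr i) ("Beard : " ++ p.1)) table)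
    PySem.Dict.empty

def tagbarba_alt (barba : String) : String :=
  PySem.Dict.getD tagbarbaTable barba "Beard : Não catalogado"

-- ===== PRECONDITION & SPEC =====
def Spec_tagbarba (barba : String) (out : String) : Prop := out = tagbarba_alt barba
instance (barba : String) (out : String) : Decidable (Spec_tagbarba barba out) := by unfold Spec_tagbarba; infer_instance

-- ===== CLAIM (what is proved, stated in full; the proofs are below) =====
def Claim_equal_tagbarba : Prop := ∀ (barba : String), Dom_tagbarba barba → Spec_tagbarba barba (tagbarba barba)

-- ===== LEMMAS AND PROOFS =====
set_option maxRecDepth 20000 in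
set_option maxHeartbeats 2000000 in
theorem tagbarba_eq (barba : String) : tagbarba barba = tagbarba_alt barba := by
  by_cases h : barba ∈ ["0","1","2","3","4","5","6","7","8","9","10","11","12","13","14","15","16","17","18","19","20","21","22","23","24","25","26","27","28","29","30","31","32","33","34","35","36","37","38","39"]
  · fin_cases h <;> decide
  · simp only [List.mem_cons, List.not_mem_nil, or_false, not_or] at h
    obtain ⟨h0,h1,h2,h3,h4,h5,h6,h7,h8,h9,h10,h11,h12,h13,h14,h15,h16,h17,h18,h19,
      h20,h21,h22,h23,h24,h25,h26,h27,h28,h29,h30,h31,h32,h33,h34,h35,h36,h37,h38,h39⟩ := h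
    have htbl : tagbarbaTable = PySem.Dict.mk
      [("0", "Beard : none"), ("5", "Beard : chevron"), ("25", "Beard : chevron"), ("26", "Beard : chevron"),
        ("4", "Beard : imperial"), ("13", "Beard : imperial"), ("17", "Beard : imperial"),
        ("18", "Beard : imperial"), ("24", "Beard : imperial"), ("29", "Beard : imperial"),
        ("33", "Beard : imperial"), ("39", "Beard : imperial"), ("3", "Beard : english"),
        ("9", "Beard : english"), ("10", "Beard : english"), ("11", "Beard : english"), ("12", "Beard : english"),
        ("21", "Beard : english"), ("27", "Beard : english"), ("2", "Beard : fu manchu"),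
        ("35", "Beard : fu manchu"), ("1", "Beard : pencil"), ("6", "Beard : pencil"), ("7", "Beard : painter"),
        ("8", "Beard : painter"), ("15", "Beard : painter"), ("28", "Beard : painter"),
        ("30", "Beard : horseshoe"), ("31", "Beard : horseshoe"), ("32", "Beard : horseshoe"),
        ("22", "Beard : pyramidal"), ("37", "Beard : pyramidal"), ("14", "Beard : walrus"),
        ("23", "Beard : walrus"), ("34", "Beard : walrus"), ("36", "Beard : walrus"), ("16", "Beard : française"),
        ("19", "Beard : française"), ("20", "Beard : handlebear"), ("38", "Beard : toothbrush")] := by decide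
    simp [tagbarba, tagbarba_alt, htbl, PySem.Dict.getD, PySem.Dict.get?, List.find?, PySem.Int.toStr,
      (show String.ofList (PySem.Int.toChars 0) = "0" by decide),
      (show String.ofList (PySem.Int.toChars 1) = "1" by decide),
      (show String.ofList (PySem.Int.toChars 2) = "2" by decide),
      (show String.ofList (PySem.Int.toChars 3) = "3" by decide),
      (show String.ofList (PySem.Int.toChars 4) = "4" by decide),
      (show String.ofList (PySem.Int.toChars 5) = "5" by decide),
      (show String.ofList (PySem.Int.toChars 6) = "6" by decide),
      (show String.ofList (PySem.Int.toChars 7) = "7" by decide),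
      (show String.ofList (PySem.Int.toChars 8) = "8" by decide),
      (show String.ofList (PySem.Int.toChars 9) = "9" by decide),
      (show String.ofList (PySem.Int.toChars 10) = "10" by decide),
      (show String.ofList (PySem.Int.toChars 11) = "11" by decide),
      (show String.ofList (PySem.Int.toChars 12) = "12" by decide),
      (show String.ofList (PySem.Int.toChars 13) = "13" by decide),
      (show String.ofList (PySem.Int.toChars 14) = "14" by decide),
      (show String.ofList (PySem.Int.toChars 15) = "15" by decide),
      (show String.ofList (PySem.Int.toChars 16) = "16" by decide),
      (show String.ofList (PySem.Int.toChars 17) = "17" by decide),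
      (show String.ofList (PySem.Int.toChars 18) = "18" by decide),
      (show String.ofList (PySem.Int.toChars 19) = "19" by decide),
      (show String.ofList (PySem.Int.toChars 20) = "20" by decide),
      (show String.ofList (PySem.Int.toChars 21) = "21" by decide),
      (show String.ofList (PySem.Int.toChars 22) = "22" by decide),
      (show String.ofList (PySem.Int.toChars 23) = "23" by decide),
      (show String.ofList (PySem.Int.toChars 24) = "24" by decide),
      (show String.ofList (PySem.Int.toChars 25) = "25" by decide),
      (show String.ofList (PySem.Int.toChars 26) = "26" by decide),
      (show String.ofList (PySem.Int.toChars 27) = "27" by decide),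
      (show String.ofList (PySem.Int.toChars 28) = "28" by decide),
      (show String.ofList (PySem.Int.toChars 29) = "29" by decide),
      (show String.ofList (PySem.Int.toChars 30) = "30" by decide),
      (show String.ofList (PySem.Int.toChars 31) = "31" by decide),
      (show String.ofList (PySem.Int.toChars 32) = "32" by decide),
      (show String.ofList (PySem.Int.toChars 33) = "33" by decide),
      (show String.ofList (PySem.Int.toChars 34) = "34" by decide),
      (show String.ofList (PySem.Int.toChars 35) = "35" by decide),
      (show String.ofList (PySem.Int.toChars 36) = "36" by decide),
      (show String.ofList (PySem.Int.toChars 37) = "37" by decide),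
      (show String.ofList (PySem.Int.toChars 38) = "38" by decide),
      (show String.ofList (PySem.Int.toChars 39) = "39" by decide),
      h0,h1,h2,h3,h4,h5,h6,h7,h8,h9,h10,h11,h12,h13,h14,h15,h16,h17,h18,h19,
      h20,h21,h22,h23,h24,h25,h26,h27,h28,h29,h30,h31,h32,h33,h34,h35,h36,h37,h38,h39,
      beq_eq_false_iff_ne.mpr (Ne.symm h0), beq_eq_false_iff_ne.mpr (Ne.symm h1), beq_eq_false_iff_ne.mpr (Ne.symm h2), beq_eq_false_iff_ne.mpr (Ne.symm h3), beq_eq_false_iff_ne.mpr (Ne.symm h4), beq_eq_false_iff_ne.mpr (Ne.symm h5), beq_eq_false_iff_ne.mpr (Ne.symm h6), beq_eq_false_iff_ne.mpr (Ne.symm h7), beq_eq_false_iff_ne.mpr (Ne.symm h8), beq_eq_false_iff_ne.mpr (Ne.symm h9), beq_eq_false_iff_ne.mpr (Ne.symm h10), beq_eq_false_iff_ne.mpr (Ne.symm h11), beq_eq_false_iff_ne.mpr (Ne.symm h12), beq_eq_false_iff_ne.mpr (Ne.symm h13), beq_eq_false_iff_ne.mpr (Ne.symm h14), beq_eq_false_iff_ne.mpr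 (Ne.symm h15), beq_eq_false_iff_ne.mpr (Ne.symm h16), beq_eq_false_iff_ne.mpr (Ne.symm h17), beq_eq_false_iff_ne.mpr (Ne.symm h18), beq_eq_false_iff_ne.mpr (Ne.symm h19), beq_eq_false_iff_ne.mpr (Ne.symm h20), beq_eq_false_iff_ne.mpr (Ne.symm h21), beq_eq_false_iff_ne.mpr (Ne.symm h22), beq_eq_false_iff_ne.mpr (Ne.symm h23), beq_eq_false_iff_ne.mpr (Ne.symm h24), beq_eq_false_iff_ne.mpr (Ne.symm h25), beq_eq_false_iff_ne.mpr (Ne.symm h26), beq_eq_false_iff_ne.mpr (Ne.symm h27), beq_eq_false_iff_ne.mpr (Ne.symm h28), beq_eq_false_iff_ne.mpr (Ne.symm h29), beq_eq_false_iff_ne.mpr (Ne.symm h30), beq_eq_false_iff_ne.mpr (Ne.symm h31), beq_eq_false_iff_ne.mpr (Ne.symm h32), beq_eq_false_iff_ne.mpr (Ne.symm h33), beq_eq_false_iff_ne.mpr (Ne.symm h34), beq_eq_false_iff_ne.mpr (Ne.symm h35), beq_eq_false_iff_ne.mpr (Ne.symm h36), beq_eq_false_iff_ne.mpr (Ne.symm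 h37), beq_eq_false_iff_ne.mpr (Ne.symm h38), beq_eq_false_iff_ne.mpr (Ne.symm h39)]

-- ===== VERDICT (by name: the statement is the Claim_ definition above) =====
theorem tagbarba_spec : Claim_equal_tagbarba := by
  intro barba _
  unfold Spec_tagbarba
  exact tagbarba_eq barba
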